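-- pv_equiv track=rewrite | github.com/AlessioPYT/MyGameWithPython | algoritms_playing.py | summ_first_and_last
-- ===== SOURCE A (Python) =====
-- def summ_first_and_last(a: list):
--     while len(a) > 1:  # продолжать, пока длина списка больше 1
--         b = a[0]
--         c = a[-1]
--         d = sum(a[1:-1])
--
--         if b + c == d:
--             break  # если сумма совпадает, прервать цикл
--         else:
--             a.pop(0)
--             a.pop(-1)
--
--     return a if len(a) > 1 else []
-- ===== SOURCE B (Python) =====
-- def summ_first_and_last(a: list):
--     # Prefix sums give each middle-sum in O(1); one linear scan over k.
--     # Return value only: unlike A, this does not mutate `a` in place.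
--     n = len(a)
--     pref = [0]
--     s = 0
--     for x in a:
--         s += x
--         pref.append(s)
--     k = 0
--     while n - 2 * k > 1:
--         # a[k] + a[n-1-k] == sum(a[k+1:n-1-k])  <=>  2*(ends) == total of a[k:n-k]
--         if 2 * (a[k] + a[n - 1 - k]) == pref[n - k] - pref[k]:
--             return a[k:n - k]
--         k += 1
--     return []
-- ===== Notes on version B (the rewrite author's own statement) =====
-- stated objective: faster
-- what changed: Replaced the re-summing of the middle slice (sum(a[1:-1]) plus two pops each iteration, O(n) per step) by one precomputed prefix-sum array and a single index scan k with an O(1) sum check per step; B returns the same value but does not mutate its argument.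
import Mathlib
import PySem

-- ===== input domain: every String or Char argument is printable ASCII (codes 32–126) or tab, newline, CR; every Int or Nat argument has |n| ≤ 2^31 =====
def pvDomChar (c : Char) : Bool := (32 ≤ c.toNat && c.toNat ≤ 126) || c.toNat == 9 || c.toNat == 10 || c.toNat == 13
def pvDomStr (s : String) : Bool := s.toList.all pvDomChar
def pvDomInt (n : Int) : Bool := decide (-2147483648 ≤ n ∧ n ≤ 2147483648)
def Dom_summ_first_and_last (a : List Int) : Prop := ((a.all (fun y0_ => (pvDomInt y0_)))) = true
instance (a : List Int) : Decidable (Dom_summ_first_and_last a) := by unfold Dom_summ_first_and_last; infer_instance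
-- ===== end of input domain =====

-- B replaces A's per-iteration sum(a[1:-1]) and end-pops by a prefix-sum array and one
-- index scan (faster); equivalence is about the RETURN value only — A mutates its
-- argument in place, B does not.

-- ===== PORT A =====
-- the while loop: each iteration reads a[0], a[-1], sum(a[1:-1]); on break it returns the
-- current list, otherwise pops both ends (pop(0) = tail, pop(-1) = dropLast; exact since
-- the guard gives length > 1) and continues.
def summA_loop (a : List Int) : List Int :=
  if h : a.length > 1 then
    let b := PySem.List.pyGetD a 0 0            -- a[0], in range: length > 1
    let c := PySem.List.pyGetD a (-1) 0         -- a[-1], in range: length > 1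
    let d := (PySem.List.slice a (some 1) (some (-1))).sum   -- sum(a[1:-1])
    if b + c = d then a
    else summA_loop a.tail.dropLast
  else a
termination_by a.length
decreasing_by simp [List.length_dropLast, List.length_tail]; omega

def summ_first_and_last (a : List Int) : List Int :=
  let r := summA_loop a
  if r.length > 1 then r else []

-- ===== PORT B =====
-- pref = [0]; s = 0; for x in a: s += x; pref.append(s)
def prefB (a : List Int) : List Int :=
  (a.foldl (fun (st : List Int × Int) x => (st.1 ++ [st.2 + x], st.2 + x)) ([0], 0)).1

-- while n - 2*k > 1: if 2*(a[k]+a[n-1-k]) == pref[n-k]-pref[k]: return a[k:n-k]; k += 1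
def summB_loop (a pref : List Int) (n k : Nat) : List Int :=
  if 2 * k + 1 < n then
    if 2 * (PySem.List.pyGetD a (k : Int) 0 + PySem.List.pyGetD a ((n : Int) - 1 - k) 0)
        = PySem.List.pyGetD pref ((n : Int) - k) 0 - PySem.List.pyGetD pref (k : Int) 0 then
      PySem.List.slice a (some (k : Int)) (some ((n : Int) - k))
    else summB_loop a pref n (k + 1)
  else []
termination_by n - 2 * k
decreasing_by omega

def summ_first_and_last_alt (a : List Int) : List Int :=
  summB_loop a (prefB a) a.length 0

-- ===== PRECONDITION & SPEC =====
def Spec_summ_first_and_last (a : List Int) (out : List Int) : Prop := out = summ_first_and_last_alt a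
instance (a : List Int) (out : List Int) : Decidable (Spec_summ_first_and_last a out) := by unfold Spec_summ_first_and_last; infer_instance

-- ===== CLAIM (what is proved, stated in full; the proofs are below) =====
def Claim_equal_summ_first_and_last : Prop := ∀ (a : List Int), Dom_summ_first_and_last a → Spec_summ_first_and_last a (summ_first_and_last a)

-- ===== LEMMAS AND PROOFS =====

-- A's loop followed by A's final filter, as a function of the list
def finA (t : List Int) : List Int :=
  if (summA_loop t).length > 1 then summA_loop t else []

lemma summA_loop_step (t : List Int) (ht : t.length > 1) :
    summA_loop t =
      if PySem.List.pyGetD t 0 0 + PySem.List.pyGetD t (-1) 0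
          = (PySem.List.slice t (some 1) (some (-1))).sum
      then t else summA_loop t.tail.dropLast := by
  rw [summA_loop]; simp only [dif_pos ht]

lemma summA_loop_stop (t : List Int) (ht : ¬ t.length > 1) : summA_loop t = t := by
  rw [summA_loop]; simp only [dif_neg ht]

-- running prefix sums, structurally
def ps (s : Int) : List Int → List Int
  | [] => []
  | x :: t => (s + x) :: ps (s + x) t

lemma ps_length (a : List Int) : ∀ s : Int, (ps s a).length = a.length := by
  induction a with
  | nil => intro s; simp [ps]
  | cons x t ih => intro s; simp [ps, ih]

lemma prefB_fold (a : List Int) : ∀ (p : List Int) (s : Int),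
    (a.foldl (fun (st : List Int × Int) x => (st.1 ++ [st.2 + x], st.2 + x)) (p, s)).1
      = p ++ ps s a := by
  induction a with
  | nil => intro p s; simp [ps]
  | cons x t ih => intro p s; simp [List.foldl, ps, ih]

lemma prefB_eq (a : List Int) : prefB a = 0 :: ps 0 a := by
  simpa using prefB_fold a [0] 0

lemma prefB_length (a : List Int) : (prefB a).length = a.length + 1 := by
  simp [prefB_eq, ps_length]

lemma ps_getD (a : List Int) : ∀ (s : Int) (i : Nat), i ≤ a.length →
    (s :: ps s a).getD i 0 = s + (a.take i).sum := by
  induction a with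
  | nil =>
    intro s i hi
    have : i = 0 := by simpa using hi
    subst this; simp [ps]
  | cons x t ih =>
    intro s i hi
    cases i with
    | zero => simp
    | succ j =>
      have h := ih (s + x) j (by simpa using hi)
      rw [List.getD_cons_succ, show ps s (x :: t) = (s + x) :: ps (s + x) t from rfl, h]
      simp
      ring

lemma prefB_getD (a : List Int) (i : Nat) (hi : i ≤ a.length) :
    (prefB a).getD i 0 = (a.take i).sum := by
  rw [prefB_eq]
  simpa using ps_getD a 0 i hi

lemma pyGetD_natD (l : List Int) (i : Nat) (h : i < l.length) :
    PySem.List.pyGetD l (i : Int) 0 = l.getD i 0 := by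
  rw [List.getD_eq_getElem _ _ h]
  rw [PySem.List.pyGetD_eq_getElem] <;> simp [h]

lemma getD_drop (l : List Int) (d i : Nat) (h : d + i < l.length) :
    (l.drop d).getD i 0 = l.getD (d + i) 0 := by
  rw [List.getD_eq_getElem _ _ (by simp; omega), List.getD_eq_getElem _ _ h]
  simp

lemma getD_append_self (p : List Int) (y : Int) (r : List Int) :
    (p ++ y :: r).getD p.length 0 = y := by
  induction p with
  | nil => rfl
  | cons hd tl ih => simp [ih]

lemma slice_mid (x y : Int) (u : List Int) :
    PySem.List.slice ((x :: u) ++ [y]) (some 1) (some (-1)) = u := by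
  simp [PySem.List.slice, PySem.List.clampIdx]
  rw [if_neg (by omega)]
  simp

-- key invariant: B's scan at index k computes A's loop-plus-filter on the middle slice a[k : n-k]
theorem key (a : List Int) (k : Nat) (hk : 2 * k ≤ a.length) :
    summB_loop a (prefB a) a.length k
      = finA ((a.drop k).take (a.length - 2 * k)) := by
  have hn : a.length = a.length := rfl
  set n := a.length with hdefn
  set m : List Int := (a.drop k).take (n - 2 * k) with hm
  have hml : m.length = n - 2 * k := by
    simp [hm]; omega
  by_cases hg : 2 * k + 1 < n
  · -- the middle slice still has length ≥ 2
    have hmlen : m.length > 1 := by omega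
    have hmne : m ≠ [] := by intro h; rw [h] at hml; simp at hml; omega
    -- decompose m = x :: u ++ [y]
    obtain ⟨x, t, hxt⟩ := List.exists_cons_of_ne_nil hmne
    have htne : t ≠ [] := by
      intro h; rw [hxt, h] at hml; simp at hml; omega
    obtain ⟨u, y, huy⟩ := (List.eq_nil_or_concat t).resolve_left htne
    have hxy : m = (x :: u) ++ [y] := by rw [hxt, huy]; simp
    have hulen : u.length = n - 2 * k - 2 := by
      rw [hxy] at hml; simp at hml; omega
    -- a.drop k starts with m
    have hw : a.drop k = (x :: u) ++ [y] ++ (a.drop k).drop (n - 2 * k) := by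
      conv_lhs => rw [← List.take_append_drop (n - 2 * k) (a.drop k)]
      rw [← hm, hxy]
    -- the four scalar reads
    have hbB : PySem.List.pyGetD a (k : Int) 0 = x := by
      rw [pyGetD_natD a k (by omega), show k = k + 0 from rfl, ← getD_drop a k 0 (by omega),
          hw]
      simp
    have hcB : PySem.List.pyGetD a ((n : Int) - 1 - k) 0 = y := by
      rw [show (n : Int) - 1 - k = ((n - 1 - k : Nat) : Int) from by omega,
          pyGetD_natD a (n - 1 - k) (by omega),
          show n - 1 - k = k + (n - 2 * k - 1) from by omega,
          ← getD_drop a k (n - 2 * k - 1) (by omega), hw]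
      rw [show (x :: u) ++ [y] ++ (a.drop k).drop (n - 2 * k)
            = (x :: u) ++ (y :: (a.drop k).drop (n - 2 * k)) from by simp]
      rw [show n - 2 * k - 1 = (x :: u).length from by simp [hulen]; omega]
      exact getD_append_self _ _ _
    have hbA : PySem.List.pyGetD m 0 0 = x := by rw [hxt]; exact PySem.List.pyGetD_zero_cons _ _ _
    have hcA : PySem.List.pyGetD m (-1) 0 = y := by
      rw [hxy]; exact PySem.List.pyGetD_neg_one_append_singleton _ _ _
    have hdA : (PySem.List.slice m (some 1) (some (-1))).sum = u.sum := by
      rw [hxy, slice_mid]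
    -- the prefix-sum difference is the sum of m
    have hpref : PySem.List.pyGetD (prefB a) ((n : Int) - k) 0
        - PySem.List.pyGetD (prefB a) (k : Int) 0 = m.sum := by
      rw [show (n : Int) - k = ((n - k : Nat) : Int) from by omega,
          pyGetD_natD _ (n - k) (by rw [prefB_length]; omega),
          pyGetD_natD _ k (by rw [prefB_length]; omega),
          prefB_getD a (n - k) (by omega), prefB_getD a k (by omega)]
      have : a.take (n - k) = a.take k ++ m := by
        rw [hm, ← List.take_add]
        congr 1
        omega
      rw [this]
      simp
    have hmsum : m.sum = x + u.sum + y := by rw [hxy]; simp; ring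
    -- one step of each loop
    rw [summB_loop]
    simp only [if_pos hg]
    rw [finA, summA_loop_step m hmlen, hbA, hcA, hdA, hbB, hcB, hpref, hmsum]
    by_cases hcond : x + y = u.sum
    · rw [if_pos (by omega), if_pos hcond, if_pos hmlen]
      rw [show (n : Int) - k = ((n - k : Nat) : Int) from by omega,
          PySem.List.slice_natCast, hm]
      congr 1
      omega
    · rw [if_neg (by omega), if_neg hcond]
      -- popped list = next middle slice
      have hmid : m.tail.dropLast = u := by rw [hxt, huy]; simp
      have hnext : (a.drop (k + 1)).take (n - 2 * (k + 1)) = u := by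
        rw [← List.tail_drop, hw]
        rw [show (x :: u) ++ [y] ++ (a.drop k).drop (n - 2 * k)
              = x :: (u ++ ([y] ++ (a.drop k).drop (n - 2 * k))) from by simp]
        rw [List.tail_cons, show n - 2 * (k + 1) = u.length from by omega, List.take_left]
      have ih := key a (k + 1) (by omega)
      rw [ih, hnext, hmid, finA]
  · -- middle slice has length ≤ 1: both sides give []
    rw [summB_loop]
    simp only [if_neg hg]
    rw [finA, summA_loop_stop m (by omega)]
    rw [if_neg (by omega)]
termination_by a.length - 2 * k
decreasing_by omega

-- ===== VERDICT (by name: the statement is the Claim_ definition above) =====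
theorem summ_first_and_last_spec : Claim_equal_summ_first_and_last := by
  intro a _
  unfold Spec_summ_first_and_last
  have h := key a 0 (by omega)
  simp only [Nat.mul_zero, Nat.sub_zero, List.drop_zero, List.take_length] at h
  simp [summ_first_and_last, summ_first_and_last_alt, finA] at h ⊢
  rw [h]
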